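-- pv_equiv track=rewrite | github.com/Gsopel/Edx | Correctionspell.py | correction
-- ===== SOURCE A (Python) =====
-- def replace_1(bad, good):
--     if len(bad) != len(good):
--         return False
--
--     changes = 0
--     for i,ch in enumerate(bad):
--         if ch != good[i]:
--             return bad[i+1:] == good[i+1:]
--
--     return False
--
-- def insert_1(bad, good):
--
--     if len(bad) != len(good) - 1:
--         return False
--
--     for i,ch in enumerate(bad):
--         if ch != good[i]:
--             return bad[i:] == good[i+1:]
--
--     # At this point, all of bad matches first part of good. So it's an
--     # append of the last character.
--     return True
--
-- def delete_1(bad, good):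
--     """Return True if bad can be converted to good by deleting 1 letter.
--     """
--     if len(bad) != len(good) + 1:
--         return False
--     return insert_1(good, bad)
--
-- def correction(word, correct_spells):
--     if len(word) < 3:
--         return word
--     if word in correct_spells:
--         return word
--     for good in correct_spells:
--         if replace_1(word, good):
--             return good
--         if insert_1(word, good):
--             return good
--         if delete_1(word, good):
--             return good
--
--     return word
-- ===== SOURCE B (Python) =====
-- def _variants(s):
--     # s itself plus every single-character deletion of s
--     return [s] + [s[:i] + s[i + 1:] for i in range(len(s))]
--
-- def correction(word, correct_spells):
--     if len(word) < 3:
--         return word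
--     if word in correct_spells:
--         return word
--     # SymSpell-style deletion index: key -> entries (index, word) whose variant set contains the key
--     index = {}
--     for idx, g in enumerate(correct_spells):
--         for k in _variants(g):
--             index.setdefault(k, []).append((idx, g))
--     best = None
--     for k in _variants(word):
--         for idx, g in index.get(k, ()):
--             # equal-length collisions must be verified: exactly one mismatching position
--             if len(g) == len(word) and sum(a != b for a, b in zip(word, g)) != 1:
--                 continue
--             if best is None or idx < best[0]:
--                 best = (idx, g)
--     return word if best is None else best[1]
-- ===== Notes on version B (the rewrite author's own statement) =====
-- stated objective: alternative
-- what changed: Replaces A's per-candidate trio of character-scanning edit tests with a SymSpell-style deletion index: every dictionary word is keyed by itself and its single-character deletions, the query probes only the word's own deletion variants, verifies equal-length collisions by mismatch count, and returns the candidate with the minimal original index.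
import Mathlib
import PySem

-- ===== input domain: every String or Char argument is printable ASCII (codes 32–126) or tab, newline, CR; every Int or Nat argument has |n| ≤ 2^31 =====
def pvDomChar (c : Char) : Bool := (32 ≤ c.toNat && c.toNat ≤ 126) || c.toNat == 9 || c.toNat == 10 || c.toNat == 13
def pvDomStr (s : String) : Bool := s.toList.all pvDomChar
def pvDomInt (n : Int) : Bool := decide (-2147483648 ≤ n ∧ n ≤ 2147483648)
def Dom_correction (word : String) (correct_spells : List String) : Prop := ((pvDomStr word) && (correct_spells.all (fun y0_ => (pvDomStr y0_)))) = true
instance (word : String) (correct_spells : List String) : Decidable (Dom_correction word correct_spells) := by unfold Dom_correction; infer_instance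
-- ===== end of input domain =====

-- B replaces A's linear scan with three char-by-char edit tests by a SymSpell-style
-- deletion index (word and dictionary keyed by their single-character deletions),
-- with mismatch-count verification for equal-length collisions and a min-index tie-break.

-- ===== PORT A =====
-- replace_1's enumerate loop (the length guard has already passed, so good[i] is safe)
def pvReplaceGo : List Char → List Char → Bool
  | b :: bs, g :: gs => if b ≠ g then bs == gs else pvReplaceGo bs gs
  | _, _ => false

def pvReplace1 (bad good : String) : Bool :=
  if (bad.toList.length : Int) ≠ (good.toList.length : Int) then false
  else pvReplaceGo bad.toList good.toList

-- insert_1's enumerate loop; the (_ :: _, []) case is unreachable under the length guard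
def pvInsertGo : List Char → List Char → Bool
  | b :: bs, g :: gs => if b ≠ g then (b :: bs) == gs else pvInsertGo bs gs
  | [], _ => true
  | _ :: _, [] => true

def pvInsert1 (bad good : String) : Bool :=
  if (bad.toList.length : Int) ≠ (good.toList.length : Int) - 1 then false
  else pvInsertGo bad.toList good.toList

def pvDelete1 (bad good : String) : Bool :=
  if (bad.toList.length : Int) ≠ (good.toList.length : Int) + 1 then false
  else pvInsert1 good bad

-- the 'for good in correct_spells' loop with its three early returns
def pvScanA (word : String) : List String → String
  | [] => word
  | g :: gs =>
      if pvReplace1 word g then g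
      else if pvInsert1 word g then g
      else if pvDelete1 word g then g
      else pvScanA word gs

def correction (word : String) (correct_spells : List String) : String :=
  if word.toList.length < 3 then word
  else if correct_spells.contains word then word
  else pvScanA word correct_spells

-- ===== PORT B =====
-- _variants(s): s itself plus every single-character deletion (s[:i] + s[i+1:], 0 ≤ i < len(s),
-- which for these in-range indices is exactly take i ++ drop (i+1))
def pvVariants (s : List Char) : List (List Char) :=
  s :: (List.range s.length).map (fun i => s.take i ++ s.drop (i + 1))

-- index.setdefault(k, []).append(p): d[k] = d.get(k, []) + [p], key position immaterial (only get is used)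
def pvInsEntry (d : PySem.Dict (List Char) (List (Int × String))) (p : Int × String) :
    PySem.Dict (List Char) (List (Int × String)) :=
  (pvVariants p.2.toList).foldl (fun d k => d.modify k [] (fun lst => lst ++ [p])) d

def pvBuildIndex (l : List String) : PySem.Dict (List Char) (List (Int × String)) :=
  (PySem.List.enumerate l).foldl pvInsEntry PySem.Dict.empty

-- the verification + min-index accumulator body of the query loop
def pvStep (word : String) (best : Option (Int × String)) (p : Int × String) :
    Option (Int × String) :=
  if p.2.toList.length == word.toList.length
      && !((word.toList.zip p.2.toList).countP (fun q => !(q.1 == q.2)) == 1) then best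
  else
    match best with
    | none => some p
    | some q => if p.1 < q.1 then some p else some q

-- the query loop: probe each variant key of the word, fold the verified entries with pvStep
def pvBest (word : String) (correct_spells : List String) : Option (Int × String) :=
  let index := pvBuildIndex correct_spells
  (pvVariants word.toList).foldl
    (fun best k => (index.getD k []).foldl (pvStep word) best) none

def correction_alt (word : String) (correct_spells : List String) : String :=
  if word.toList.length < 3 then word
  else if correct_spells.contains word then word
  else
    match pvBest word correct_spells with
    | none => word
    | some q => q.2

-- ===== PRECONDITION & SPEC =====
def Spec_correction (word : String) (correct_spells : List String) (out : String) : Prop := out = correction_alt word correct_spells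
instance (word : String) (correct_spells : List String) (out : String) : Decidable (Spec_correction word correct_spells out) := by unfold Spec_correction; infer_instance

-- ===== CLAIM (what is proved, stated in full; the proofs are below) =====
def Claim_equal_correction : Prop := ∀ (word : String) (correct_spells : List String), Dom_correction word correct_spells → Spec_correction word correct_spells (correction word correct_spells)

-- ===== LEMMAS AND PROOFS =====

-- deletion of the character at index i
def pvDel (s : List Char) (i : Nat) : List Char := s.take i ++ s.drop (i + 1)

-- Hamming mismatch count as B computes it
def pvHam (a b : List Char) : Nat := (a.zip b).countP (fun q => !(q.1 == q.2))

-- B's per-candidate acceptance test (skip iff equal length and mismatch count ≠ 1)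
def pvPass (word g : String) : Bool :=
  !(g.toList.length == word.toList.length && !(pvHam word.toList g.toList == 1))

def pvShared (a b : List Char) : Prop := ∃ k, k ∈ pvVariants a ∧ k ∈ pvVariants b

def pvQb (word g : String) : Bool := pvReplace1 word g || pvInsert1 word g || pvDelete1 word g

lemma mem_pvVariants {k s : List Char} :
    k ∈ pvVariants s ↔ k = s ∨ ∃ i < s.length, k = pvDel s i := by
  simp [pvVariants, pvDel, List.mem_map, List.mem_range, eq_comm]

lemma length_pvDel {s : List Char} {i : Nat} (h : i < s.length) :
    (pvDel s i).length + 1 = s.length := by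
  simp [pvDel]; omega

lemma pvDel_cons_succ (c : Char) (s : List Char) (i : Nat) :
    pvDel (c :: s) (i + 1) = c :: pvDel s i := by
  simp [pvDel]

lemma pvDel_cons_zero (c : Char) (s : List Char) : pvDel (c :: s) 0 = s := by
  simp [pvDel]

lemma pvHam_nil_left (b : List Char) : pvHam [] b = 0 := by simp [pvHam]

lemma pvHam_cons (x y : Char) (xs ys : List Char) :
    pvHam (x :: xs) (y :: ys) = pvHam xs ys + (if x = y then 0 else 1) := by
  by_cases h : x = y <;> simp [pvHam, h]

lemma pvHam_zero : ∀ {a b : List Char}, a.length = b.length → (pvHam a b = 0 ↔ a = b)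
  | [], [], _ => by simp [pvHam]
  | x :: xs, y :: ys, h => by
    have ih := pvHam_zero (a := xs) (b := ys) (by simpa using h)
    by_cases hxy : x = y <;> simp [pvHam_cons, hxy, ih]

lemma replaceGo_iff : ∀ {a b : List Char}, a.length = b.length →
    (pvReplaceGo a b = true ↔ pvHam a b = 1)
  | [], [], _ => by simp [pvReplaceGo, pvHam]
  | x :: xs, y :: ys, h => by
    have hlen : xs.length = ys.length := by simpa using h
    have ih := replaceGo_iff hlen
    have h0 := pvHam_zero hlen
    have hc := pvHam_cons x y xs ys
    by_cases hxy : x = y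
    · simp [pvReplaceGo, hxy, pvHam_cons, ih]
    · constructor
      · intro hgo
        have heq : xs = ys := by simpa [pvReplaceGo, hxy] using hgo
        have : pvHam xs ys = 0 := h0.mpr heq
        simp [hxy] at hc; omega
      · intro hh
        have : pvHam xs ys = 0 := by simp [hxy] at hc; omega
        have heq : xs = ys := h0.mp this
        simp [pvReplaceGo, hxy, heq]

lemma insertGo_iff : ∀ {a b : List Char}, a.length + 1 = b.length →
    (pvInsertGo a b = true ↔ ∃ i < b.length, a = pvDel b i)
  | [], [y], _ => by
    refine ⟨fun _ => ⟨0, by simp, by simp [pvDel]⟩, fun _ => by simp [pvInsertGo]⟩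
  | x :: xs, y :: ys, h => by
    have hlen : xs.length + 1 = ys.length := by simpa using h
    have ih := insertGo_iff hlen
    by_cases hxy : x = y
    · subst hxy
      rw [show pvInsertGo (x :: xs) (x :: ys) = pvInsertGo xs ys by simp [pvInsertGo]]
      rw [ih]
      constructor
      · rintro ⟨i, hi, rfl⟩
        exact ⟨i + 1, by simpa using hi, by rw [pvDel_cons_succ]⟩
      · rintro ⟨i, hi, heq⟩
        match i, hi with
        | 0, _ =>
          rw [pvDel_cons_zero] at heq
          exact ⟨0, by omega, by rw [← heq, pvDel_cons_zero]⟩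
        | (j + 1), hj =>
          rw [pvDel_cons_succ] at heq
          exact ⟨j, by simpa using hj, by simpa using heq⟩
    · rw [show pvInsertGo (x :: xs) (y :: ys) = ((x :: xs) == ys) by simp [pvInsertGo, hxy]]
      constructor
      · intro hb
        exact ⟨0, by simp, by rw [pvDel_cons_zero]; exact (beq_iff_eq.mp hb)⟩
      · rintro ⟨i, hi, heq⟩
        match i, hi with
        | 0, _ => rw [pvDel_cons_zero] at heq; exact beq_iff_eq.mpr heq
        | (j + 1), hj =>
          rw [pvDel_cons_succ] at heq
          exact absurd (List.cons.inj heq).1 hxy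

lemma shared_of_ham1 : ∀ {a b : List Char}, a.length = b.length → pvHam a b = 1 →
    ∃ k, (∃ i < a.length, k = pvDel a i) ∧ ∃ j < b.length, k = pvDel b j
  | [], b, h, h1 => by simp [pvHam_nil_left] at h1
  | x :: xs, [], h, h1 => by simp at h
  | x :: xs, y :: ys, h, h1 => by
    have hlen : xs.length = ys.length := by simpa using h
    have hc := pvHam_cons x y xs ys
    by_cases hxy : x = y
    · subst hxy
      have : pvHam xs ys = 1 := by simp at hc; omega
      obtain ⟨k, ⟨i, hi, hki⟩, ⟨j, hj, hkj⟩⟩ := shared_of_ham1 hlen this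
      exact ⟨x :: k,
        ⟨i + 1, by simpa using hi, by rw [pvDel_cons_succ, hki]⟩,
        ⟨j + 1, by simpa using hj, by rw [pvDel_cons_succ, hkj]⟩⟩
    · have : pvHam xs ys = 0 := by simp [hxy] at hc; omega
      have heq : xs = ys := (pvHam_zero hlen).mp this
      exact ⟨xs, ⟨0, by simp, (pvDel_cons_zero _ _).symm⟩,
        ⟨0, by simp, by rw [pvDel_cons_zero, heq]⟩⟩

lemma pvDel_mem_pvVariants {s : List Char} {i : Nat} (h : i < s.length) :
    pvDel s i ∈ pvVariants s :=
  mem_pvVariants.mpr (Or.inr ⟨i, h, rfl⟩)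

lemma self_mem_pvVariants (s : List Char) : s ∈ pvVariants s :=
  mem_pvVariants.mpr (Or.inl rfl)

lemma variant_cases {k s : List Char} (h : k ∈ pvVariants s) :
    k = s ∨ (k.length + 1 = s.length ∧ ∃ i < s.length, k = pvDel s i) := by
  rcases mem_pvVariants.mp h with rfl | ⟨i, hi, rfl⟩
  · exact Or.inl rfl
  · exact Or.inr ⟨length_pvDel hi, i, hi, rfl⟩

lemma pvReplace1_eq {word g : String} (h : word.toList.length = g.toList.length) :
    pvReplace1 word g = pvReplaceGo word.toList g.toList := by
  unfold pvReplace1; rw [if_neg (not_ne_iff.mpr (by omega))]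

lemma pvReplace1_false {word g : String} (h : word.toList.length ≠ g.toList.length) :
    pvReplace1 word g = false := by
  unfold pvReplace1; rw [if_pos (by omega)]

lemma pvInsert1_eq {word g : String} (h : word.toList.length + 1 = g.toList.length) :
    pvInsert1 word g = pvInsertGo word.toList g.toList := by
  unfold pvInsert1; rw [if_neg (not_ne_iff.mpr (by omega))]

lemma pvInsert1_false {word g : String} (h : word.toList.length + 1 ≠ g.toList.length) :
    pvInsert1 word g = false := by
  unfold pvInsert1; rw [if_pos (by omega)]

lemma pvDelete1_eq {word g : String} (h : g.toList.length + 1 = word.toList.length) :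
    pvDelete1 word g = pvInsertGo g.toList word.toList := by
  unfold pvDelete1; rw [if_neg (not_ne_iff.mpr (by omega)), pvInsert1_eq h]

lemma pvDelete1_false {word g : String} (h : g.toList.length + 1 ≠ word.toList.length) :
    pvDelete1 word g = false := by
  unfold pvDelete1
  by_cases hg : (word.toList.length : Int) ≠ (g.toList.length : Int) + 1
  · rw [if_pos hg]
  · rw [if_neg hg, pvInsert1_false (by omega)]


lemma pvPass_true_of_ne {word g : String} (h : g.toList.length ≠ word.toList.length) :
    pvPass word g = true := by
  unfold pvPass
  rw [show (g.toList.length == word.toList.length) = false from beq_eq_false_iff_ne.mpr h]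
  rfl

lemma pvPass_eq_iff {word g : String} (h : g.toList.length = word.toList.length) :
    pvPass word g = true ↔ pvHam word.toList g.toList = 1 := by
  unfold pvPass
  rw [show (g.toList.length == word.toList.length) = true from beq_iff_eq.mpr h]
  simp

lemma shared_lengths {a b : List Char} (h : pvShared a b) :
    a.length = b.length ∨ a.length + 1 = b.length ∨ b.length + 1 = a.length := by
  obtain ⟨k, hka, hkb⟩ := h
  rcases variant_cases hka with rfl | ⟨hla, -⟩ <;>
    rcases variant_cases hkb with h' | ⟨hlb, -⟩ <;>
    first
      | (subst h'; left; rfl)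
      | (have := congrArg List.length h'; omega)
      | omega

lemma Q_iff (word g : String) :
    pvQb word g = true ↔ (pvShared word.toList g.toList ∧ pvPass word g = true) := by
  by_cases h1 : word.toList.length = g.toList.length
  · rw [pvQb, pvReplace1_eq h1, pvInsert1_false (by omega), pvDelete1_false (by omega)]
    rw [Bool.or_false, Bool.or_false, replaceGo_iff h1, pvPass_eq_iff h1.symm]
    constructor
    · intro hh
      obtain ⟨k, ⟨i, hi, hki⟩, ⟨j, hj, hkj⟩⟩ := shared_of_ham1 h1 hh
      exact ⟨⟨k, hki ▸ pvDel_mem_pvVariants hi, hkj ▸ pvDel_mem_pvVariants hj⟩, hh⟩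
    · exact fun h => h.2
  · by_cases h2 : word.toList.length + 1 = g.toList.length
    · rw [pvQb, pvReplace1_false h1, pvInsert1_eq h2, pvDelete1_false (by omega)]
      rw [Bool.false_or, Bool.or_false, insertGo_iff h2]
      simp only [pvPass_true_of_ne (show g.toList.length ≠ word.toList.length by omega),
        and_true]
      constructor
      · rintro ⟨i, hi, heq⟩
        exact ⟨word.toList, self_mem_pvVariants _, by rw [heq]; exact pvDel_mem_pvVariants hi⟩
      · rintro ⟨k, hka, hkb⟩
        rcases variant_cases hka with rfl | ⟨hla, -⟩
        · rcases variant_cases hkb with heqb | ⟨hlb, i, hi, heqk⟩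
          · have := congrArg List.length heqb; omega
          · exact ⟨i, hi, heqk⟩
        · rcases variant_cases hkb with heqb | ⟨hlb, -⟩
          · have := congrArg List.length heqb; omega
          · omega
    · by_cases h3 : g.toList.length + 1 = word.toList.length
      · rw [pvQb, pvReplace1_false h1, pvInsert1_false (by omega), pvDelete1_eq h3]
        rw [Bool.false_or, Bool.false_or, insertGo_iff h3]
        simp only [pvPass_true_of_ne (show g.toList.length ≠ word.toList.length by omega),
          and_true]
        constructor
        · rintro ⟨i, hi, hgi⟩
          exact ⟨g.toList, by rw [hgi]; exact pvDel_mem_pvVariants hi, self_mem_pvVariants _⟩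
        · rintro ⟨k, hka, hkb⟩
          rcases variant_cases hkb with rfl | ⟨hlb, -⟩
          · rcases variant_cases hka with heqa | ⟨hla, i, hi, heqk⟩
            · have := congrArg List.length heqa; omega
            · exact ⟨i, hi, heqk⟩
          · rcases variant_cases hka with heqa | ⟨hla, -⟩
            · have := congrArg List.length heqa; omega
            · omega
      · rw [pvQb, pvReplace1_false h1, pvInsert1_false (by omega), pvDelete1_false (by omega)]
        refine ⟨fun h => absurd h Bool.false_ne_true, fun h => ?_⟩
        rcases shared_lengths h.1 with hh | hh | hh
        · exact absurd hh h1
        · exact absurd hh h2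
        · exact absurd hh h3

-- ---- the deletion index: bucket membership ----

lemma getD_foldl_modify (p : Int × String) :
    ∀ (ks : List (List Char)) (d : PySem.Dict (List Char) (List (Int × String))) (k : List Char),
      ((ks.foldl (fun d k' => d.modify k' [] (fun lst => lst ++ [p])) d).getD k []) =
        d.getD k [] ++ List.replicate (ks.count k) p
  | [], d, k => by simp
  | k' :: ks, d, k => by
    rw [List.foldl_cons, getD_foldl_modify p ks _ k, PySem.Dict.getD_modify]
    by_cases hk : k = k'
    · subst hk
      rw [if_pos rfl, List.count_cons, if_pos (by simp), List.append_assoc]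
      simp [List.replicate_succ]
    · rw [if_neg hk, List.count_cons, if_neg (by simp [Ne.symm hk]), Nat.add_zero]

lemma mem_insEntry {d : PySem.Dict (List Char) (List (Int × String))}
    {q p : Int × String} {k : List Char} :
    p ∈ (pvInsEntry d q).getD k [] ↔ p ∈ d.getD k [] ∨ (p = q ∧ k ∈ pvVariants q.2.toList) := by
  unfold pvInsEntry
  rw [getD_foldl_modify]
  simp only [List.mem_append, List.mem_replicate]
  constructor
  · rintro (h | ⟨hn, rfl⟩)
    · exact Or.inl h
    · exact Or.inr ⟨rfl, List.count_pos_iff.mp (Nat.pos_of_ne_zero hn)⟩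
  · rintro (h | ⟨rfl, hmem⟩)
    · exact Or.inl h
    · exact Or.inr ⟨(List.count_pos_iff.mpr hmem).ne', rfl⟩

lemma mem_buildIndex_aux (p : Int × String) (k : List Char) :
    ∀ (es : List (Int × String)) (d : PySem.Dict (List Char) (List (Int × String))),
      p ∈ (es.foldl pvInsEntry d).getD k [] ↔
        p ∈ d.getD k [] ∨ (p ∈ es ∧ k ∈ pvVariants p.2.toList)
  | [], d => by simp
  | q :: es, d => by
    rw [List.foldl_cons, mem_buildIndex_aux p k es _]
    rw [show (p ∈ (pvInsEntry d q).getD k []) = (p ∈ d.getD k [] ∨ (p = q ∧ k ∈ pvVariants q.2.toList)) from propext mem_insEntry]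
    constructor
    · rintro ((h | ⟨rfl, hv⟩) | ⟨hmem, hv⟩)
      · exact Or.inl h
      · exact Or.inr ⟨List.mem_cons_self, hv⟩
      · exact Or.inr ⟨List.mem_cons_of_mem _ hmem, hv⟩
    · rintro (h | ⟨hmem, hv⟩)
      · exact Or.inl (Or.inl h)
      · rcases List.mem_cons.mp hmem with rfl | hmem'
        · exact Or.inl (Or.inr ⟨rfl, hv⟩)
        · exact Or.inr ⟨hmem', hv⟩

lemma mem_bucket {l : List String} {k : List Char} {p : Int × String} :
    p ∈ (pvBuildIndex l).getD k [] ↔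
      p ∈ PySem.List.enumerate l ∧ k ∈ pvVariants p.2.toList := by
  unfold pvBuildIndex
  rw [mem_buildIndex_aux]
  simp [PySem.Dict.empty, PySem.Dict.getD, PySem.Dict.get?]

-- ---- the min-index fold ----

lemma pvStep_eq (word : String) (best : Option (Int × String)) (p : Int × String) :
    pvStep word best p =
      if pvPass word p.2 then
        (match best with
         | none => some p
         | some q => if p.1 < q.1 then some p else some q)
      else best := by
  unfold pvStep
  cases hc : (p.2.toList.length == word.toList.length
      && !((word.toList.zip p.2.toList).countP (fun q => !(q.1 == q.2)) == 1)) <;>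
    rw [show pvPass word p.2 = !(p.2.toList.length == word.toList.length
      && !((word.toList.zip p.2.toList).countP (fun q => !(q.1 == q.2)) == 1)) from rfl, hc] <;>
    simp

lemma minFold_none_iff (word : String) :
    ∀ (xs : List (Int × String)) (acc : Option (Int × String)),
      xs.foldl (pvStep word) acc = none ↔ acc = none ∧ ∀ p ∈ xs, pvPass word p.2 = false
  | [], acc => by simp
  | p :: xs, acc => by
    rw [List.foldl_cons, minFold_none_iff word xs _, pvStep_eq]
    cases hc : pvPass word p.2
    · rw [if_neg (by simp)]
      constructor
      · rintro ⟨ha, hall⟩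
        refine ⟨ha, ?_⟩
        intro p' hp'
        rcases List.mem_cons.mp hp' with rfl | hp'
        · exact hc
        · exact hall p' hp'
      · rintro ⟨ha, hall⟩
        exact ⟨ha, fun p' hp' => hall p' (List.mem_cons_of_mem _ hp')⟩
    · rw [if_pos rfl]
      constructor
      · rintro ⟨h, -⟩
        cases acc <;> simp at h
        split at h <;> simp at h
      · rintro ⟨-, hall⟩
        exact absurd (hall p List.mem_cons_self) (by simp [hc])

lemma minFold_some_spec (word : String) :
    ∀ (xs : List (Int × String)) (acc : Option (Int × String)) (q : Int × String),
      xs.foldl (pvStep word) acc = some q →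
        (acc = some q ∨ (pvPass word q.2 = true ∧ q ∈ xs))
        ∧ (∀ q0, acc = some q0 → q.1 ≤ q0.1)
        ∧ (∀ p ∈ xs, pvPass word p.2 = true → q.1 ≤ p.1)
  | [], acc, q => by
    intro h
    simp only [List.foldl_nil] at h
    subst h
    exact ⟨Or.inl rfl, fun q0 hq0 => le_of_eq (congrArg Prod.fst (Option.some_inj.mp hq0)),
      by simp⟩
  | p :: xs, acc, q => by
    intro h
    rw [List.foldl_cons] at h
    by_cases hc : pvPass word p.2 = true
    · cases acc with
      | none =>
        have hstep : pvStep word none p = some p := by rw [pvStep_eq, if_pos hc]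
        rw [hstep] at h
        obtain ⟨h1, h2, h3⟩ := minFold_some_spec word xs (some p) q h
        have hqp : q.1 ≤ p.1 := h2 p rfl
        refine ⟨?_, ?_, ?_⟩
        · rcases h1 with h1 | ⟨hp', hm⟩
          · have hpq : p = q := Option.some_inj.mp h1
            exact Or.inr ⟨hpq ▸ hc, hpq ▸ List.mem_cons_self⟩
          · exact Or.inr ⟨hp', List.mem_cons_of_mem _ hm⟩
        · intro q0 h0; cases h0
        · intro p' hp' hpass
          rcases List.mem_cons.mp hp' with rfl | hp'
          · exact hqp
          · exact h3 p' hp' hpass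
      | some q0 =>
        by_cases hlt : p.1 < q0.1
        · have hstep : pvStep word (some q0) p = some p := by
            rw [pvStep_eq, if_pos hc]; simp [hlt]
          rw [hstep] at h
          obtain ⟨h1, h2, h3⟩ := minFold_some_spec word xs (some p) q h
          have hqp : q.1 ≤ p.1 := h2 p rfl
          refine ⟨?_, ?_, ?_⟩
          · rcases h1 with h1 | ⟨hp', hm⟩
            · have hpq : p = q := Option.some_inj.mp h1
              exact Or.inr ⟨hpq ▸ hc, hpq ▸ List.mem_cons_self⟩
            · exact Or.inr ⟨hp', List.mem_cons_of_mem _ hm⟩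
          · rintro q0' hq0'
            have heq := Option.some_inj.mp hq0'
            subst heq
            omega
          · intro p' hp' hpass
            rcases List.mem_cons.mp hp' with rfl | hp'
            · exact hqp
            · exact h3 p' hp' hpass
        · have hstep : pvStep word (some q0) p = some q0 := by
            rw [pvStep_eq, if_pos hc]; simp [hlt]
          rw [hstep] at h
          obtain ⟨h1, h2, h3⟩ := minFold_some_spec word xs (some q0) q h
          have hqq0 : q.1 ≤ q0.1 := h2 q0 rfl
          refine ⟨?_, ?_, ?_⟩
          · rcases h1 with h1 | ⟨hp', hm⟩
            · exact Or.inl h1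
            · exact Or.inr ⟨hp', List.mem_cons_of_mem _ hm⟩
          · rintro q0' hq0'
            have heq := Option.some_inj.mp hq0'
            subst heq
            exact hqq0
          · intro p' hp' hpass
            rcases List.mem_cons.mp hp' with rfl | hp'
            · omega
            · exact h3 p' hp' hpass
    · have hstep : pvStep word acc p = acc := by rw [pvStep_eq, if_neg hc]
      rw [hstep] at h
      obtain ⟨h1, h2, h3⟩ := minFold_some_spec word xs acc q h
      refine ⟨?_, h2, ?_⟩
      · rcases h1 with h1 | ⟨hp', hm⟩
        · exact Or.inl h1
        · exact Or.inr ⟨hp', List.mem_cons_of_mem _ hm⟩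
      · intro p' hp' hpass
        rcases List.mem_cons.mp hp' with rfl | hp'
        · exact absurd hpass hc
        · exact h3 p' hp' hpass

-- ---- A's scan as find? ----

lemma scanA_eq_find? (word : String) :
    ∀ l : List String, pvScanA word l = (l.find? (pvQb word)).getD word
  | [] => rfl
  | g :: gs => by
    cases hr : pvReplace1 word g <;> cases hi : pvInsert1 word g <;>
      cases hd : pvDelete1 word g <;>
        simp [pvScanA, pvQb, List.find?, hr, hi, hd, scanA_eq_find? word gs]

lemma le_fst_of_mem_enumerate {xs : List String} {s : Int} {p : Int × String}
    (h : p ∈ PySem.List.enumerate xs s) : s ≤ p.1 := by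
  rw [PySem.List.mem_enumerate_iff] at h
  obtain ⟨k, hk, rfl⟩ := h
  simp

lemma enumerate_fst_inj {l : List String} {s : Int} {p q : Int × String}
    (hp : p ∈ PySem.List.enumerate l s) (hq : q ∈ PySem.List.enumerate l s)
    (hfst : p.1 = q.1) : p = q := by
  rw [PySem.List.mem_enumerate_iff] at hp hq
  obtain ⟨k, hk, rfl⟩ := hp
  obtain ⟨k', hk', rfl⟩ := hq
  simp only at hfst
  have : k = k' := by omega
  subst this
  rfl

lemma find?_enumerate_spec (f : String → Bool) :
    ∀ (l : List String) (s : Int) (g : String), l.find? f = some g →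
      ∃ i : Int, (i, g) ∈ PySem.List.enumerate l s ∧ f g = true ∧
        ∀ p ∈ PySem.List.enumerate l s, f p.2 = true → i ≤ p.1
  | [], s, g => by intro h; simp at h
  | x :: xs, s, g => by
    intro h
    cases hx : f x
    · rw [List.find?_cons_of_neg (by simp [hx])] at h
      obtain ⟨i, hmem, hg, hmin⟩ := find?_enumerate_spec f xs (s + 1) g h
      refine ⟨i, by rw [PySem.List.enumerate_cons]; exact List.mem_cons_of_mem _ hmem, hg, ?_⟩
      intro p hp hfp
      rw [PySem.List.enumerate_cons, List.mem_cons] at hp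
      rcases hp with rfl | hp
      · rw [show (s, x).2 = x from rfl, hx] at hfp; cases hfp
      · exact hmin p hp hfp
    · rw [List.find?_cons_of_pos hx] at h
      rw [Option.some_inj] at h
      subst h
      refine ⟨s, by rw [PySem.List.enumerate_cons]; exact List.mem_cons_self, hx, ?_⟩
      intro p hp hfp
      rw [PySem.List.enumerate_cons, List.mem_cons] at hp
      rcases hp with rfl | hp
      · simp
      · have := le_fst_of_mem_enumerate hp; omega

-- ---- assembly ----

lemma mem_candList {word : String} {l : List String} {p : Int × String} :
    p ∈ (pvVariants word.toList).flatMap (fun k => (pvBuildIndex l).getD k []) ↔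
      p ∈ PySem.List.enumerate l ∧ pvShared word.toList p.2.toList := by
  rw [List.mem_flatMap]
  constructor
  · rintro ⟨k, hkw, hbk⟩
    obtain ⟨hmem, hkv⟩ := mem_bucket.mp hbk
    exact ⟨hmem, k, hkw, hkv⟩
  · rintro ⟨hmem, k, hkw, hkv⟩
    exact ⟨k, hkw, mem_bucket.mpr ⟨hmem, hkv⟩⟩

lemma snd_mem_of_mem_enumerate {l : List String} {p : Int × String}
    (h : p ∈ PySem.List.enumerate l) : p.2 ∈ l := by
  rw [PySem.List.mem_enumerate_iff] at h
  obtain ⟨k, hk, rfl⟩ := h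
  exact List.getElem_mem hk

lemma correction_eq_alt (word : String) (l : List String) :
    correction word l = correction_alt word l := by
  unfold correction correction_alt
  by_cases hlen : word.toList.length < 3
  · rw [if_pos hlen, if_pos hlen]
  rw [if_neg hlen, if_neg hlen]
  by_cases hmem : l.contains word = true
  · rw [if_pos hmem, if_pos hmem]
  rw [if_neg hmem, if_neg hmem]
  have hbest : pvBest word l =
      ((pvVariants word.toList).flatMap (fun k => (pvBuildIndex l).getD k [])).foldl
        (pvStep word) none := by
    rw [pvBest, List.foldl_flatMap]
  set cand := (pvVariants word.toList).flatMap (fun k => (pvBuildIndex l).getD k []) with hcand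
  rw [scanA_eq_find?]
  cases hfind : l.find? (pvQb word) with
  | none =>
    have hnone : cand.foldl (pvStep word) none = none := by
      rw [minFold_none_iff]
      refine ⟨rfl, ?_⟩
      intro p hp
      obtain ⟨hen, hsh⟩ := mem_candList.mp hp
      cases hpass : pvPass word p.2
      · rfl
      · exfalso
        have hQ : pvQb word p.2 = true := (Q_iff word p.2).mpr ⟨hsh, hpass⟩
        have := List.find?_eq_none.mp hfind p.2 (snd_mem_of_mem_enumerate hen)
        rw [hQ] at this; cases this rfl
    rw [hbest, hnone]
    rfl
  | some g0 =>
    obtain ⟨i0, hmem0, hQ0, hmin0⟩ := find?_enumerate_spec (pvQb word) l 0 g0 hfind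
    obtain ⟨hsh0, hpass0⟩ := (Q_iff word g0).mp hQ0
    have hcand0 : (i0, g0) ∈ cand := mem_candList.mpr ⟨hmem0, hsh0⟩
    rw [hbest]
    cases hres : cand.foldl (pvStep word) none with
    | none =>
      exfalso
      have := (minFold_none_iff word cand none).mp hres
      exact absurd (this.2 (i0, g0) hcand0) (by simpa using hpass0)
    | some q =>
      obtain ⟨h1, -, h3⟩ := minFold_some_spec word cand none q hres
      rcases h1 with h1 | ⟨hpq, hq⟩
      · cases h1
      obtain ⟨henq, hshq⟩ := mem_candList.mp hq
      have hQq : pvQb word q.2 = true := (Q_iff word q.2).mpr ⟨hshq, hpq⟩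
      have hle1 : i0 ≤ q.1 := hmin0 q henq hQq
      have hle2 : q.1 ≤ i0 := h3 (i0, g0) hcand0 (by simpa using hpass0)
      have : q = (i0, g0) := enumerate_fst_inj henq hmem0 (by omega)
      rw [this]
      rfl

-- ===== VERDICT (by name: the statement is the Claim_ definition above) =====
theorem correction_spec : Claim_equal_correction := by
  intro word l _
  unfold Spec_correction
  exact correction_eq_alt word l
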